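-- pv_equiv track=rewrite | github.com/cahyohackids/AksaraLLM | scripts/build_pretrain_corpus_v2.py | doc_is_contaminated
-- ===== SOURCE A (Python) =====
-- from typing import Callable, Dict, Iterable, Iterator, List, Optional, Sequence, Tuple
--
-- def _ngrams(text: str, n: int) -> Iterator[str]:
--     tokens = text.split()
--     for i in range(len(tokens) - n + 1):
--         yield " ".join(tokens[i : i + n])
--
-- def doc_is_contaminated(text: str, bad: set[str], n: int = 13) -> bool:
--     # Fast pre-check: if the doc has fewer than n tokens, nothing to match.
--     tokens = text.split()
--     if len(tokens) < n:
--         return False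
--     for g in _ngrams(text, n):
--         if g in bad:
--             return True
--     return False
-- ===== SOURCE B (Python) =====
-- def doc_is_contaminated(text: str, bad: set[str], n: int = 13) -> bool:
--     if n <= 0:
--         raise ValueError("n-gram size must be positive")
--     tokens = text.split()
--     m = len(tokens)
--     if m < n:
--         return False
--     # Bucket the bad phrases by character length; only windows whose
--     # character length hits a bucket are ever joined and looked up.
--     by_len = {}
--     for b in bad:
--         by_len.setdefault(len(b), set()).add(b)
--     lens = [len(t) for t in tokens]
--     # Rolling character length of the joined window tokens[i:i+n].
--     wl = sum(lens[:n]) + n - 1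
--     i = 0
--     while True:
--         if wl in by_len and " ".join(tokens[i:i + n]) in by_len[wl]:
--             return True
--         if i + n == m:
--             return False
--         wl += lens[i + n] - lens[i]
--         i += 1
-- ===== Notes on version B (the rewrite author's own statement) =====
-- stated objective: alternative
-- what changed: A joins every n-token window and tests it against the bad set; B buckets the bad phrases by character length once, tracks the joined window's character length with an O(1) rolling update, and only joins and looks up windows whose length hits a bucket; B raises ValueError for n <= 0 instead of reproducing A's negative-slice accident.
-- outside the precondition, e.g. on doc_is_contaminated('cc b cc cc', {'b cc'}, -2): A returns True, B raises ValueError; on doc_is_contaminated('', {''}, 0): A returns True, B raises ValueError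
import Mathlib
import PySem

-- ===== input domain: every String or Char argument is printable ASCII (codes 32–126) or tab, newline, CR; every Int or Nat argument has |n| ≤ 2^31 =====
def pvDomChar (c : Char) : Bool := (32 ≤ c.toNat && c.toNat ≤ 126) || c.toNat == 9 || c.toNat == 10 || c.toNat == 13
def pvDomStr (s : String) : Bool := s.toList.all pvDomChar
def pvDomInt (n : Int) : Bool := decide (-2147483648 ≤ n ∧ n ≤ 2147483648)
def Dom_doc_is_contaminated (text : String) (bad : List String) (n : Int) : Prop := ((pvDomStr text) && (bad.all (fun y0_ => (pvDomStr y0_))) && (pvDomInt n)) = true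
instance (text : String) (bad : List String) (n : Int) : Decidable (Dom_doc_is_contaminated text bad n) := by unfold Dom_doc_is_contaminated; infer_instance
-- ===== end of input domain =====

-- B buckets the bad phrases by character length and scans the token windows with a
-- rolling joined-window length, joining a window only when its length hits a bucket
-- (alternative decomposition; no speed claim). B raises ValueError for n ≤ 0 (outside Pre_).

-- ===== PORT A =====
-- generator _ngrams(text, n), materialised as the list of the yielded strings
def pvNgrams (text : String) (n : Int) : List String :=
  let tokens := PySem.Str.split₀ text
  (PySem.List.pyRange 0 ((tokens.length : Int) - n + 1)).map
    (fun i => PySem.Str.join " " (PySem.List.slice tokens (some i) (some (i + n))))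

def doc_is_contaminated (text : String) (bad : List String) (n : Int) : Bool :=
  let tokens := PySem.Str.split₀ text
  if (tokens.length : Int) < n then false
  else (pvNgrams text n).any (fun g => bad.contains g)

-- ===== PORT B =====
-- "wl in by_len and ' '.join(tokens[i:i+n]) in by_len[wl]"
def pvHit (byLen : PySem.Dict Int (PySem.Set String)) (tokens : List String)
    (n : Int) (i : Nat) (wl : Int) : Bool :=
  match byLen.get? wl with
  | none => false
  | some s => s.contains (PySem.Str.join " " (PySem.List.slice tokens (some (i : Int)) (some ((i : Int) + n))))

-- the "while True" loop; fuel = m - n - i counts the windows still ahead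
def pvAltLoop (byLen : PySem.Dict Int (PySem.Set String)) (tokens : List String)
    (lens : List Int) (n : Int) : Nat → Nat → Int → Bool
  | 0, i, wl => pvHit byLen tokens n i wl
  | k+1, i, wl =>
    if pvHit byLen tokens n i wl then true
    else pvAltLoop byLen tokens lens n k (i+1)
      (wl + ((PySem.List.pyGet? lens ((i : Int) + n)).getD 0 - (PySem.List.pyGet? lens (i : Int)).getD 0))

def doc_is_contaminated_alt (text : String) (bad : List String) (n : Int) : Bool :=
  if n ≤ 0 then false  -- the Python B raises ValueError here; these inputs are outside Pre_
  else
    let tokens := PySem.Str.split₀ text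
    let m := tokens.length
    if (m : Int) < n then false
    else
      let byLen := bad.foldl
        (fun d b => d.modify (PySem.Str.len b) PySem.Set.empty (fun s => s.add b))
        PySem.Dict.empty
      let lens := tokens.map PySem.Str.len
      pvAltLoop byLen tokens lens n (m - n.toNat) 0 ((PySem.List.slice lens none (some n)).sum + n - 1)

-- ===== PRECONDITION & SPEC =====
-- Pre_ excludes n ≤ 0, where A's slice tokens[i:i+n] hits Python's negative-slice
-- wraparound and accidentally matches shorter grams, while B raises ValueError.
def Pre_doc_is_contaminated (text : String) (bad : List String) (n : Int) : Prop := 1 ≤ n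
instance (text : String) (bad : List String) (n : Int) : Decidable (Pre_doc_is_contaminated text bad n) := by unfold Pre_doc_is_contaminated; infer_instance

def pvWitness_doc_is_contaminated : String × List String × Int := ("aa bb cc", ["bb cc"], 2)

def Spec_doc_is_contaminated (text : String) (bad : List String) (n : Int) (out : Bool) : Prop := out = doc_is_contaminated_alt text bad n
instance (text : String) (bad : List String) (n : Int) (out : Bool) : Decidable (Spec_doc_is_contaminated text bad n out) := by unfold Spec_doc_is_contaminated; infer_instance

-- ===== CLAIM (what is proved, stated in full; the proofs are below) =====
def Claim_equal_doc_is_contaminated : Prop := ∀ (text : String) (bad : List String) (n : Int), Dom_doc_is_contaminated text bad n → Pre_doc_is_contaminated text bad n → Spec_doc_is_contaminated text bad n (doc_is_contaminated text bad n)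

-- ===== LEMMAS AND PROOFS =====

-- the window tokens[j : j+N] and its joined gram
def pvW (tokens : List String) (N j : Nat) : List String := (tokens.drop j).take N
def pvG (tokens : List String) (N j : Nat) : String := PySem.Str.join " " (pvW tokens N j)
-- the rolling window character length numerator
def pvSL (lens : List Int) (N j : Nat) : Int := ((lens.drop j).take N).sum


lemma pvMatchSome (v : PySem.Set String) (g : String) :
    (match some v with | none => false | some s => s.contains g) = v.contains g := rfl

lemma pvAddContains (s : PySem.Set String) (b g : String) :
    (s.add b).contains g = (s.contains g || g == b) := by
  simp only [PySem.Set.add]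
  by_cases hb : s.contains b = true
  · rw [if_pos hb]
    by_cases hg : g = b
    · subst hg
      have hg' : g ∈ s := by simpa using hb
      simp [hg']
    · simp [hg]
  · rw [if_neg hb]
    apply Bool.eq_iff_iff.mpr
    simp

lemma pvStep (d : PySem.Dict Int (PySem.Set String)) (b g : String) (k : Int) :
    (match (d.modify (PySem.Str.len b) PySem.Set.empty (fun s => s.add b)).get? k with
     | none => false
     | some s => s.contains g)
    = ((match d.get? k with | none => false | some s => s.contains g)
        || ((g == b) && decide (PySem.Str.len g = k))) := by
  simp only [PySem.Dict.modify]
  have hins := PySem.Dict.get?_insert d (PySem.Str.len b) k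
    ((d.getD (PySem.Str.len b) PySem.Set.empty).add b)
  by_cases hk : k = PySem.Str.len b
  · rw [if_pos hk] at hins
    subst hk
    rw [hins, pvMatchSome, pvAddContains, PySem.Dict.getD_eq_get?_getD]
    by_cases hg : g = b
    · subst hg
      simp
    · have hgb : (g == b) = false := by simp [hg]
      rw [hgb, Bool.or_false, Bool.false_and, Bool.or_false]
      cases hd : d.get? (PySem.Str.len b) with
      | none => simp [PySem.Set.empty]
      | some s => simp
  · rw [if_neg hk] at hins
    rw [hins]
    by_cases hg : g = b
    · subst hg
      have hf : decide (PySem.Str.len g = k) = false := by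
        rw [decide_eq_false_iff_not]
        intro h
        exact hk h.symm
      rw [hf, Bool.and_false, Bool.or_false]
    · have hgb : (g == b) = false := by simp [hg]
      rw [hgb, Bool.false_and, Bool.or_false]

lemma pvBucketAux (l : List String) (d : PySem.Dict Int (PySem.Set String)) (k : Int) (g : String) :
    (match (l.foldl (fun d b => d.modify (PySem.Str.len b) PySem.Set.empty (fun s => s.add b)) d).get? k with
     | none => false
     | some s => s.contains g)
    = ((match d.get? k with | none => false | some s => s.contains g)
        || (l.contains g && decide (PySem.Str.len g = k))) := by
  induction l generalizing d with
  | nil => simp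
  | cons b rest ih =>
    rw [List.foldl_cons, ih, pvStep]
    simp only [List.contains_cons]
    cases h1 : (match d.get? k with | none => false | some s => s.contains g) <;>
      cases h2 : (g == b) <;> cases h3 : rest.contains g <;>
      cases h4 : decide (PySem.Str.len g = k) <;> simp

lemma pvBucket (bad : List String) (k : Int) (g : String) :
    (match (bad.foldl (fun d b => d.modify (PySem.Str.len b) PySem.Set.empty (fun s => s.add b)) PySem.Dict.empty).get? k with
     | none => false
     | some s => s.contains g) = (bad.contains g && decide (PySem.Str.len g = k)) := by
  rw [pvBucketAux]
  simp [PySem.Dict.get?_empty]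

lemma pvJoinSpaceLen (ps : List (List Char)) (h : ps ≠ []) :
    (PySem.Chars.join [' '] ps).length + 1 = (ps.map List.length).sum + ps.length := by
  induction ps with
  | nil => simp at h
  | cons p rest ih =>
    cases rest with
    | nil => simp [PySem.Chars.join_singleton]
    | cons q rest' =>
      rw [PySem.Chars.join_cons_cons]
      have hih := ih (List.cons_ne_nil q rest')
      simp only [List.length_append, List.map_cons, List.sum_cons, List.length_cons,
        List.length_nil] at hih ⊢
      omega

lemma pvWindowLen (tokens : List String) (N j : Nat) (hN : 1 ≤ N) (hjm : j + N ≤ tokens.length) :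
    (pvW tokens N j).length = N := by
  unfold pvW
  simp only [List.length_take, List.length_drop]
  omega

lemma pvLenG (tokens : List String) (N j : Nat) (hN : 1 ≤ N) (hjm : j + N ≤ tokens.length) :
    PySem.Str.len (pvG tokens N j) = pvSL (tokens.map PySem.Str.len) N j + (N : Int) - 1 := by
  have hc : (pvW tokens N j).length = N := pvWindowLen tokens N j hN hjm
  have hne : (pvW tokens N j).map String.toList ≠ [] := by
    simp only [ne_eq, List.map_eq_nil_iff]
    intro h0
    rw [h0] at hc
    simp at hc
    omega
  have hchars := pvJoinSpaceLen ((pvW tokens N j).map String.toList) hne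
  unfold pvG
  rw [PySem.Str.len_eq, PySem.Str.toList_join]
  have hsep : (" " : String).toList = [' '] := rfl
  rw [hsep]
  have hSL : pvSL (tokens.map PySem.Str.len) N j
      = ((((pvW tokens N j).map String.toList).map List.length).sum : Int) := by
    unfold pvSL pvW
    rw [← List.map_drop, ← List.map_take, List.map_map, Nat.cast_list_sum, List.map_map]
    apply congrArg List.sum
    apply List.map_congr_left
    intro s _
    simp [Function.comp, PySem.Str.len_eq]
  rw [hSL]
  have hlen : ((pvW tokens N j).map String.toList).length = N := by
    simpa using hc
  rw [hlen] at hchars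
  omega

lemma pvSLstep (lens : List Int) (N j : Nat) (hN : 1 ≤ N) (hjm : j + 1 + N ≤ lens.length) :
    pvSL lens N (j+1) = pvSL lens N j + lens.getD (j+N) 0 - lens.getD j 0 := by
  obtain ⟨K, rfl⟩ : ∃ K, N = K + 1 := ⟨N - 1, by omega⟩
  have hj : j < lens.length := by omega
  have hk : j + 1 + K < lens.length := by omega
  unfold pvSL
  rw [List.drop_eq_getElem_cons hj, List.take_succ_cons, List.sum_cons]
  rw [List.take_succ]
  have h1 : (lens.drop (j+1))[K]? = some lens[j+1+K] := by
    rw [List.getElem?_drop]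
    exact List.getElem?_eq_getElem hk
  rw [h1]
  have h2 : lens.getD (j + (K+1)) 0 = lens[j+1+K] := by
    rw [List.getD_eq_getElem?_getD]
    have : j + (K+1) = j + 1 + K := by omega
    rw [this, List.getElem?_eq_getElem hk]
    rfl
  have h3 : lens.getD j 0 = lens[j] := by
    rw [List.getD_eq_getElem?_getD, List.getElem?_eq_getElem hj]
    rfl
  rw [h2, h3]
  simp only [Option.toList_some, List.sum_append, List.sum_cons, List.sum_nil]
  ring

lemma pvSliceW (tokens : List String) (n : Int) (N j : Nat) (hn : (N : Int) = n) :
    PySem.List.slice tokens (some (j : Int)) (some ((j : Int) + n)) = pvW tokens N j := by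
  have h1 : (j : Int) + n = ((j + N : Nat) : Int) := by rw [← hn]; push_cast; ring
  rw [h1, PySem.List.slice_natCast]
  unfold pvW
  congr 1
  omega

lemma pvHitEq (bad : List String) (tokens : List String) (n : Int) (N j : Nat)
    (hn : (N : Int) = n) (hN : 1 ≤ N) (hjm : j + N ≤ tokens.length) :
    pvHit (bad.foldl (fun d b => d.modify (PySem.Str.len b) PySem.Set.empty (fun s => s.add b)) PySem.Dict.empty)
      tokens n j (pvSL (tokens.map PySem.Str.len) N j + n - 1) = bad.contains (pvG tokens N j) := by
  unfold pvHit
  rw [pvSliceW tokens n N j hn]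
  rw [pvBucket]
  have hfold : PySem.Str.join " " (pvW tokens N j) = pvG tokens N j := rfl
  rw [hfold]
  have hlen : PySem.Str.len (pvG tokens N j) = pvSL (tokens.map PySem.Str.len) N j + n - 1 := by
    rw [pvLenG tokens N j hN hjm, hn]
  rw [hlen]
  simp

lemma pvAnyShift (f : Nat → Bool) (k j : Nat) :
    (List.range (k+1)).any (fun t => f (j + t)) = (f j || (List.range k).any (fun t => f (j + 1 + t))) := by
  rw [List.range_succ_eq_map]
  simp only [List.any_cons, List.any_map, Function.comp_def, Nat.add_zero]
  have h : (fun t => f (j + Nat.succ t)) = (fun t => f (j + 1 + t)) :=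
    funext fun t => congrArg f (by omega)
  rw [h]

lemma pvLoopEq (bad : List String) (tokens : List String) (n : Int) (N : Nat)
    (hn : (N : Int) = n) (hN : 1 ≤ N) :
    ∀ (k j : Nat), j + N + k = tokens.length →
    pvAltLoop (bad.foldl (fun d b => d.modify (PySem.Str.len b) PySem.Set.empty (fun s => s.add b)) PySem.Dict.empty)
      tokens (tokens.map PySem.Str.len) n k j (pvSL (tokens.map PySem.Str.len) N j + n - 1) =
    (List.range (k+1)).any (fun t => bad.contains (pvG tokens N (j+t))) := by
  intro k
  induction k with
  | zero =>
    intro j hm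
    rw [pvAltLoop]
    rw [pvHitEq bad tokens n N j hn hN (by omega)]
    simp
  | succ k ih =>
    intro j hm
    rw [pvAltLoop]
    rw [pvHitEq bad tokens n N j hn hN (by omega)]
    by_cases hb : bad.contains (pvG tokens N j) = true
    · rw [hb]
      simp only [if_true]
      symm
      rw [List.any_eq_true]
      exact ⟨0, by simp, by simpa using hb⟩
    · rw [Bool.not_eq_true] at hb
      rw [hb]
      simp only [Bool.false_eq_true, if_false]
      have hlen : (tokens.map PySem.Str.len).length = tokens.length := by simp
      have hg1 : PySem.List.pyGet? (tokens.map PySem.Str.len) ((j : Int) + n)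
          = some ((tokens.map PySem.Str.len).getD (j + N) 0) := by
        have h1 : (j : Int) + n = ((j + N : Nat) : Int) := by rw [← hn]; push_cast; ring
        rw [h1, PySem.List.pyGet?_natCast]
        have hlt : j + N < (tokens.map PySem.Str.len).length := by rw [hlen]; omega
        rw [List.getElem?_eq_getElem hlt, List.getD_eq_getElem?_getD, List.getElem?_eq_getElem hlt]
        rfl
      have hg2 : PySem.List.pyGet? (tokens.map PySem.Str.len) ((j : Int))
          = some ((tokens.map PySem.Str.len).getD j 0) := by
        rw [PySem.List.pyGet?_natCast]
        have hlt : j < (tokens.map PySem.Str.len).length := by rw [hlen]; omega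
        rw [List.getElem?_eq_getElem hlt, List.getD_eq_getElem?_getD, List.getElem?_eq_getElem hlt]
        rfl
      rw [hg1, hg2]
      simp only [Option.getD_some]
      have harg : pvSL (tokens.map PySem.Str.len) N j + n - 1
            + ((tokens.map PySem.Str.len).getD (j + N) 0 - (tokens.map PySem.Str.len).getD j 0)
          = pvSL (tokens.map PySem.Str.len) N (j+1) + n - 1 := by
        rw [pvSLstep (tokens.map PySem.Str.len) N j hN (by rw [hlen]; omega)]
        ring
      rw [harg, ih (j+1) (by omega)]
      conv_rhs => rw [pvAnyShift (fun i => bad.contains (pvG tokens N i)) (k+1) j]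
      simp only [hb, Bool.false_or]

lemma pvNgramsEq (text : String) (n : Int) (N : Nat) (hn : (N : Int) = n) (hN : 1 ≤ N)
    (hm : N ≤ (PySem.Str.split₀ text).length) :
    pvNgrams text n = (List.range ((PySem.Str.split₀ text).length - N + 1)).map
      (fun j => pvG (PySem.Str.split₀ text) N j) := by
  have hdef : pvNgrams text n
      = (PySem.List.pyRange 0 (((PySem.Str.split₀ text).length : Int) - n + 1)).map
        (fun i => PySem.Str.join " " (PySem.List.slice (PySem.Str.split₀ text) (some i) (some (i + n)))) := rfl
  rw [hdef, PySem.List.pyRange_one]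
  have hK : (((PySem.Str.split₀ text).length : Int) - n + 1 - 0).toNat
      = (PySem.Str.split₀ text).length - N + 1 := by omega
  rw [hK, List.map_map]
  apply List.map_congr_left
  intro t _
  simp only [Function.comp]
  rw [zero_add, pvSliceW (PySem.Str.split₀ text) n N t hn]
  rfl

-- ===== VERDICT (by name: the statement is the Claim_ definition above) =====
theorem doc_is_contaminated_spec : Claim_equal_doc_is_contaminated := by
  intro text bad n _ hpre
  unfold Spec_doc_is_contaminated
  have hpre' : 1 ≤ n := hpre
  set N := n.toNat with hNdef
  have hn : (N : Int) = n := Int.toNat_of_nonneg (by omega)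
  have hN : 1 ≤ N := by omega
  unfold doc_is_contaminated doc_is_contaminated_alt
  simp only []
  rw [if_neg (show ¬ n ≤ 0 by omega)]
  by_cases hm : ((PySem.Str.split₀ text).length : Int) < n
  · rw [if_pos hm, if_pos hm]
  · rw [if_neg hm, if_neg hm]
    have hmN : N ≤ (PySem.Str.split₀ text).length := by omega
    rw [pvNgramsEq text n N hn hN hmN]
    have hslice : PySem.List.slice ((PySem.Str.split₀ text).map PySem.Str.len) none (some n)
        = ((PySem.Str.split₀ text).map PySem.Str.len).take N := by
      rw [PySem.List.slice_to _ (by omega)]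
    have hinit : (PySem.List.slice ((PySem.Str.split₀ text).map PySem.Str.len) none (some n)).sum + n - 1
        = pvSL ((PySem.Str.split₀ text).map PySem.Str.len) N 0 + n - 1 := by
      rw [hslice]; unfold pvSL; rw [List.drop_zero]
    rw [hinit]
    have hfuel : (PySem.Str.split₀ text).length - n.toNat = (PySem.Str.split₀ text).length - N := rfl
    rw [hfuel, pvLoopEq bad (PySem.Str.split₀ text) n N hn hN ((PySem.Str.split₀ text).length - N) 0 (by omega)]
    rw [List.any_map]
    simp only [Function.comp_def, zero_add]
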